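-- pv_equiv track=rewrite | github.com/Leon-C-T/PythonBasics2 | Assessment1/Code/python1.py | nine
-- ===== SOURCE A (Python) =====
-- def nine (inputString, char):
--  x = inputString.replace(" ","")
--  x = list(x)
--  y = 0
--  for i in x:
--     if i == char:
--         y = x.index(i)
--  if y > 0:
--      return y+1
--  else:
--      return y-1
-- ===== SOURCE B (Python) =====
-- def nine(inputString, char):
--     x = inputString.replace(" ", "")
--     for idx, c in enumerate(x):
--         if c == char:
--             return idx + 1 if idx > 0 else idx - 1
--     return -1
-- ===== Notes on version B (the rewrite author's own statement) =====
-- stated objective: simpler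
-- what changed: A scans the whole despaced string and re-runs x.index (a fresh scan) on every match, then decides the return from leftover loop state; B is a single enumerate pass that returns directly at the first match and -1 after the loop, with no .index calls and no post-loop branch.
import Mathlib
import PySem

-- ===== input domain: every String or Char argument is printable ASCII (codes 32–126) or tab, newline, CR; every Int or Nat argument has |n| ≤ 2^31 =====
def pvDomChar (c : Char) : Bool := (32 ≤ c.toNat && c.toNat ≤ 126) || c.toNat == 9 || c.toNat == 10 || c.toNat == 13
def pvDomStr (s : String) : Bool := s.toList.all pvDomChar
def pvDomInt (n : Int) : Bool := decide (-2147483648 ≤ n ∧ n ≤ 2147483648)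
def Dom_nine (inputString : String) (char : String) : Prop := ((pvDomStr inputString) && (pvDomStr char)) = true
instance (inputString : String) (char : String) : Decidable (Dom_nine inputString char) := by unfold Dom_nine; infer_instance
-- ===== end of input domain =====

-- B replaces A's full scan with its x.index re-scans and post-loop state by a single
-- enumerate pass that returns at the first match; objective: simpler.

-- ===== PORT A =====
-- x = inputString.replace(" ",""); x = list(x); for i in x: if i == char: y = x.index(i)
-- (i is a 1-char string in Python, so 'i == char' is ported as String.ofList [i] == char;
--  x.index(i) cannot raise here since i ∈ x, so the Option is read with getD 0)
def nine (inputString : String) (char : String) : Int :=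
  let x := (PySem.Str.replace inputString " " "").toList
  let y : Int := x.foldl
    (fun y i => if String.ofList [i] == char then (((PySem.List.index? x i).getD 0 : Nat) : Int) else y) 0
  if y > 0 then y + 1 else y - 1

-- ===== PORT B =====
-- for idx, c in enumerate(x): if c == char: return idx+1 if idx>0 else idx-1; return -1
def nineAltGo (char : String) : List Char → Int → Int
  | [], _ => -1
  | c :: rest, idx =>
      if String.ofList [c] == char then (if idx > 0 then idx + 1 else idx - 1)
      else nineAltGo char rest (idx + 1)

def nine_alt (inputString : String) (char : String) : Int :=
  nineAltGo char ((PySem.Str.replace inputString " " "").toList) 0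

-- ===== PRECONDITION & SPEC =====
def Spec_nine (inputString : String) (char : String) (out : Int) : Prop := out = nine_alt inputString char
instance (inputString : String) (char : String) (out : Int) : Decidable (Spec_nine inputString char out) := by unfold Spec_nine; infer_instance

-- ===== CLAIM (what is proved, stated in full; the proofs are below) =====
def Claim_equal_nine : Prop := ∀ (inputString : String) (char : String), Dom_nine inputString char → Spec_nine inputString char (nine inputString char)

-- ===== LEMMAS AND PROOFS =====

-- a branch that always assigns the same value k collapses the fold to "any"
theorem foldl_if_const {α β : Type} (p : α → Bool) (g : α → β) (k : β) (l : List α)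
    (h : ∀ a ∈ l, p a = true → g a = k) (b₀ : β) :
    l.foldl (fun y i => if p i then g i else y) b₀ = if l.any p then k else b₀ := by
  induction l generalizing b₀ with
  | nil => simp
  | cons a l ih =>
    simp only [List.foldl_cons, List.any_cons]
    by_cases hp : p a = true
    · rw [if_pos hp]
      rw [ih (fun a ha hpa => h a (List.mem_cons_of_mem _ ha) hpa) (g a),
          h a (List.mem_cons_self) hp]
      simp [hp]
    · rw [if_neg hp, ih (fun a ha hpa => h a (List.mem_cons_of_mem _ ha) hpa) b₀]
      simp [Bool.eq_false_iff.mpr hp]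

-- characterization of B's loop by the first matching index
theorem nineAltGo_eq (char : String) (x : List Char) (idx : Int) :
    nineAltGo char x idx =
      match x.findIdx? (fun c => String.ofList [c] == char) with
      | none => -1
      | some j => if idx + (j : Int) > 0 then idx + (j : Int) + 1 else idx + (j : Int) - 1 := by
  induction x generalizing idx with
  | nil => simp [nineAltGo]
  | cons c rest ih =>
    rw [List.findIdx?_cons]
    by_cases hp : (String.ofList [c] == char) = true
    · simp only [nineAltGo, hp, if_pos]
      simp
    · simp only [nineAltGo, hp, if_false, Bool.false_eq_true]
      rw [ih (idx + 1)]
      cases hf : rest.findIdx? (fun c => String.ofList [c] == char) with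
      | none => simp
      | some j =>
        simp only [Option.map_some]
        push_cast
        have h1 : idx + 1 + (j : Int) = idx + ((j : Int) + 1) := by ring
        rw [h1]

-- the matching predicate is equality with the (unique) matching character
theorem pred_eq_beq (char : String) (a : Char) (ha : (String.ofList [a] == char) = true) :
    (fun c => c == a) = (fun c => String.ofList [c] == char) := by
  funext c
  have hchar : String.ofList [a] = char := by simpa using ha
  rw [← hchar]
  by_cases hc : c = a
  · simp [hc]
  · have : String.ofList [c] ≠ String.ofList [a] := by
      intro h
      have := congrArg String.toList h
      simp only [String.toList_ofList] at this
      exact hc (by simpa using this)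
    simp [hc, this]

-- characterization of A's fold by the first matching index
theorem nine_foldl_eq (char : String) (x : List Char) :
    x.foldl (fun y i => if String.ofList [i] == char then (((PySem.List.index? x i).getD 0 : Nat) : Int) else y) 0
      = match x.findIdx? (fun c => String.ofList [c] == char) with
        | none => (0 : Int)
        | some j => (j : Int) := by
  cases hf : x.findIdx? (fun c => String.ofList [c] == char) with
  | none =>
    have hnone : ∀ a ∈ x, (String.ofList [a] == char) = false := List.findIdx?_eq_none_iff.mp hf
    rw [foldl_if_const _ _ (0 : Int) x
        (fun a ha hpa => absurd hpa (by simp [hnone a ha]))]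
    have : x.any (fun c => String.ofList [c] == char) = false := by
      simp only [List.any_eq_false]
      intro a ha; simp [hnone a ha]
    simp [this]
  | some j =>
    rw [foldl_if_const _ _ ((j : Nat) : Int) x ?_]
    · have : x.any (fun c => String.ofList [c] == char) = true := by
        by_contra hne
        have hall : ∀ a ∈ x, (String.ofList [a] == char) = false := by
          simpa using List.any_eq_false.mp (Bool.eq_false_iff.mpr hne)
        rw [List.findIdx?_eq_none_iff.mpr hall] at hf
        simp at hf
      simp [this]
    · intro a _ hpa
      have hidx : List.idxOf? a x = some j := by
        have : List.idxOf? a x = List.findIdx? (fun c => c == a) x := rfl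
        rw [this, pred_eq_beq char a hpa, hf]
      simp [PySem.List.index?_eq_idxOf?, hidx]

-- ===== VERDICT (by name: the statement is the Claim_ definition above) =====
theorem nine_spec : Claim_equal_nine := by
  intro inputString char _
  unfold Spec_nine nine nine_alt
  simp only [nineAltGo_eq, nine_foldl_eq]
  cases hf : ((PySem.Str.replace inputString " " "").toList).findIdx? (fun c => String.ofList [c] == char) with
  | none => norm_num
  | some _ => simp
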